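-- pv_equiv track=rewrite | github.com/kumagai-group/pydefect | pydefect/input_maker/defect_set_maker.py | charge_set
-- ===== SOURCE A (Python) =====
-- from typing import Dict, List
--
-- def charge_set(ox_state: int) -> List[int]:
--     """Set of defect charge states.
--
--     -1 (1) is included for positive (negative) odd number.
--     E.g., charge_set(3) = [-1, 0, 1, 2, 3]
--           charge_set(-3) = [-3, -2, -1, 0, 1]
--           charge_set(2) = [0, 1, 2]
--           charge_set(-4) = [-4, -3, -2, -1, 0]
--
--     Args:
--         ox_state (int): an integer
--
--     Returns:
--         Set of candidate charges
--     """
--     if ox_state >= 0: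
--         charges = [i for i in range(ox_state + 1)]
--         if ox_state % 2 == 1:
--             charges.insert(0, -1)
--     else:
--         charges = [i for i in range(ox_state, 1)]
--         if ox_state % 2 == 1:
--             charges.append(1)
--
--     return charges
-- ===== SOURCE B (Python) =====
-- def charge_set(ox_state: int):
--     """Peel the range off in pairs: one loop collects the charges above the
--     base window {-1,0,1}/{0} (downward, reversed at the end), one collects
--     those below it (upward), then the base core is placed between them."""
--     n = ox_state
--     upper = []  # charges above the core, collected downward
--     lower = []  # charges below the core, collected upward
--     while n >= 2:
--         upper += [n, n - 1]
--         n -= 2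
--     while n <= -2:
--         lower += [n, n + 1]
--         n += 2
--     upper.reverse()
--     core = [0] if n == 0 else [-1, 0, 1]
--     return lower + core + upper
-- ===== Notes on version B (the rewrite author's own statement) =====
-- stated objective: alternative
-- what changed: B replaces A's range-comprehension-then-insert/append with a pair-peeling construction: two countdown loops collect, two charges at a time, the parts above and below the base window {-1,0,1}/{0}, the upper part is reversed and the core spliced in between.
import Mathlib
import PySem

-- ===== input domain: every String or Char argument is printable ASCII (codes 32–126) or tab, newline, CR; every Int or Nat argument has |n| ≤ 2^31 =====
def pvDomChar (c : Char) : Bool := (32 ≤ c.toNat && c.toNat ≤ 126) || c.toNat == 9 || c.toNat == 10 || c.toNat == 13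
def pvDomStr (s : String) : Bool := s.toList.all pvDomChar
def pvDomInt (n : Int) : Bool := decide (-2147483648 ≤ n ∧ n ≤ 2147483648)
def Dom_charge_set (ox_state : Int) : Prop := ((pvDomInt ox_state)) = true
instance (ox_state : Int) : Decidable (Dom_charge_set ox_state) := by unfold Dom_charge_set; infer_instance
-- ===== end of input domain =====

-- B replaces A's build-then-patch range by a pair-peeling construction (two countdown
-- loops around a base core, upper half reversed); objective: alternative.

-- ===== PORT A =====
def charge_set (ox_state : Int) : List Int :=
  if ox_state ≥ 0 then
    let charges := PySem.List.pyRange 0 (ox_state + 1) 1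
    if PySem.Int.mod ox_state 2 = 1 then (-1) :: charges else charges
  else
    let charges := PySem.List.pyRange ox_state 1 1
    if PySem.Int.mod ox_state 2 = 1 then charges ++ [1] else charges

-- ===== PORT B =====
-- the first while loop of Source B: while n >= 2: upper += [n, n-1]; n -= 2
def pvUpLoop (n : Int) (acc : List Int) : List Int × Int :=
  if 2 ≤ n then pvUpLoop (n - 2) (acc ++ [n, n - 1]) else (acc, n)
termination_by n.toNat
decreasing_by omega

-- the second while loop of Source B: while n <= -2: lower += [n, n+1]; n += 2
def pvDownLoop (n : Int) (acc : List Int) : List Int × Int :=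
  if n ≤ -2 then pvDownLoop (n + 2) (acc ++ [n, n + 1]) else (acc, n)
termination_by (-n).toNat
decreasing_by omega

def charge_set_alt (ox_state : Int) : List Int :=
  let u := pvUpLoop ox_state []
  let l := pvDownLoop u.2 []
  let core : List Int := if l.2 = 0 then [0] else [-1, 0, 1]
  l.1 ++ core ++ u.1.reverse

-- ===== PRECONDITION & SPEC =====
def Spec_charge_set (ox_state : Int) (out : List Int) : Prop := out = charge_set_alt ox_state
instance (ox_state : Int) (out : List Int) : Decidable (Spec_charge_set ox_state out) := by unfold Spec_charge_set; infer_instance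

-- ===== CLAIM (what is proved, stated in full; the proofs are below) =====
def Claim_equal_charge_set : Prop := ∀ (ox_state : Int), Dom_charge_set ox_state → Spec_charge_set ox_state (charge_set ox_state)

-- ===== LEMMAS AND PROOFS =====
theorem pv_mod2 (n : Int) : PySem.Int.mod n 2 = n % 2 :=
  PySem.Int.mod_eq_emod_of_pos (by norm_num)

theorem upLoop_step (n : Int) (acc : List Int) (h : 2 ≤ n) :
    pvUpLoop n acc = pvUpLoop (n - 2) (acc ++ [n, n - 1]) := by
  rw [pvUpLoop, if_pos h]

theorem upLoop_id (n : Int) (acc : List Int) (h : n ≤ 1) : pvUpLoop n acc = (acc, n) := by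
  rw [pvUpLoop, if_neg (by omega)]

theorem downLoop_step (n : Int) (acc : List Int) (h : n ≤ -2) :
    pvDownLoop n acc = pvDownLoop (n + 2) (acc ++ [n, n + 1]) := by
  rw [pvDownLoop, if_pos h]

theorem downLoop_id (n : Int) (acc : List Int) (h : -1 ≤ n) : pvDownLoop n acc = (acc, n) := by
  rw [pvDownLoop, if_neg (by omega)]

-- accumulator laws for the two loops
theorem upLoop_acc (n : Int) (acc : List Int) :
    pvUpLoop n acc = (acc ++ (pvUpLoop n []).1, (pvUpLoop n []).2) := by
  have H : ∀ (k : Nat) (n : Int), n.toNat = k → ∀ acc : List Int,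
      pvUpLoop n acc = (acc ++ (pvUpLoop n []).1, (pvUpLoop n []).2) := by
    intro k
    induction k using Nat.strong_induction_on with
    | _ k ih =>
      intro n hk acc
      by_cases h : 2 ≤ n
      · rw [upLoop_step n acc h, upLoop_step n [] h,
            ih (n - 2).toNat (by omega) (n - 2) rfl (acc ++ [n, n - 1]),
            ih (n - 2).toNat (by omega) (n - 2) rfl ([] ++ [n, n - 1])]
        simp
      · rw [upLoop_id n acc (by omega), upLoop_id n [] (by omega)]
        simp
  exact H n.toNat n rfl acc

theorem downLoop_acc (n : Int) (acc : List Int) :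
    pvDownLoop n acc = (acc ++ (pvDownLoop n []).1, (pvDownLoop n []).2) := by
  have H : ∀ (k : Nat) (n : Int), (-n).toNat = k → ∀ acc : List Int,
      pvDownLoop n acc = (acc ++ (pvDownLoop n []).1, (pvDownLoop n []).2) := by
    intro k
    induction k using Nat.strong_induction_on with
    | _ k ih =>
      intro n hk acc
      by_cases h : n ≤ -2
      · rw [downLoop_step n acc h, downLoop_step n [] h,
            ih (-(n + 2)).toNat (by omega) (n + 2) rfl (acc ++ [n, n + 1]),
            ih (-(n + 2)).toNat (by omega) (n + 2) rfl ([] ++ [n, n + 1])]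
        simp
      · rw [downLoop_id n acc (by omega), downLoop_id n [] (by omega)]
        simp
  exact H (-n).toNat n rfl acc

theorem upLoop_snd (n : Int) (h0 : 0 ≤ n) : (pvUpLoop n []).2 = n % 2 := by
  have H : ∀ (k : Nat) (n : Int), n.toNat = k → 0 ≤ n → (pvUpLoop n []).2 = n % 2 := by
    intro k
    induction k using Nat.strong_induction_on with
    | _ k ih =>
      intro n hk h0
      by_cases h : 2 ≤ n
      · rw [upLoop_step n [] h, upLoop_acc]
        rw [ih (n - 2).toNat (by omega) (n - 2) rfl (by omega)]
        omega
      · rw [upLoop_id n [] (by omega)]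
        omega
  exact H n.toNat n rfl h0

-- recurrences of A for |n| ≥ 2
theorem A_pos (n : Int) (h : 2 ≤ n) : charge_set n = charge_set (n - 2) ++ [n - 1, n] := by
  unfold charge_set
  rw [if_pos (by omega : n ≥ 0), if_pos (by omega : n - 2 ≥ 0)]
  simp only [pv_mod2]
  have e2 : PySem.List.pyRange 0 (n + 1) 1
      = PySem.List.pyRange 0 (n - 1) 1 ++ [n - 1, n] := by
    rw [PySem.List.pyRange_one_append 0 (n - 1) (n + 1) (by omega) (by omega),
        PySem.List.pyRange_one_cons (show n - 1 < n + 1 by omega),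
        show n - 1 + 1 = n by ring,
        PySem.List.pyRange_one_cons (show n < n + 1 by omega),
        PySem.List.pyRange_one_eq_nil (by omega : n + 1 ≤ n + 1)]
  have e3 : n - 2 + 1 = n - 1 := by ring
  rw [e2, e3]
  rcases Int.emod_two_eq n with hp | hp <;>
    simp [hp, show (n - 2) % 2 = n % 2 by omega]

theorem A_neg (n : Int) (h : n ≤ -2) : charge_set n = n :: (n + 1) :: charge_set (n + 2) := by
  rcases eq_or_lt_of_le h with rfl | h3
  · decide
  · unfold charge_set
    rw [if_neg (by omega : ¬ n ≥ 0), if_neg (by omega : ¬ n + 2 ≥ 0)]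
    simp only [pv_mod2]
    have e : PySem.List.pyRange n 1 1 = n :: (n + 1) :: PySem.List.pyRange (n + 2) 1 1 := by
      rw [PySem.List.pyRange_one_cons (by omega : n < 1),
          PySem.List.pyRange_one_cons (by omega : n + 1 < 1),
          show n + 1 + 1 = n + 2 by ring]
    rw [e]
    rcases Int.emod_two_eq n with hp | hp <;>
      simp [hp, show (n + 2) % 2 = n % 2 by omega]

-- recurrences of B for |n| ≥ 2
theorem B_pos (n : Int) (h : 2 ≤ n) : charge_set_alt n = charge_set_alt (n - 2) ++ [n - 1, n] := by
  simp only [charge_set_alt]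
  rw [upLoop_step n [] h, List.nil_append, upLoop_acc (n - 2) [n, n - 1]]
  have hr : (pvUpLoop (n - 2) []).2 = (n - 2) % 2 := upLoop_snd _ (by omega)
  rw [hr, downLoop_id _ _ (by omega)]
  simp

theorem B_neg (n : Int) (h : n ≤ -2) : charge_set_alt n = n :: (n + 1) :: charge_set_alt (n + 2) := by
  simp only [charge_set_alt]
  rw [upLoop_id n [] (by omega), upLoop_id (n + 2) [] (by omega),
      downLoop_step n [] h, List.nil_append, downLoop_acc (n + 2) [n, n + 1]]
  simp

theorem B_base (n : Int) (h1 : -1 ≤ n) (h2 : n ≤ 1) :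
    charge_set_alt n = if n = 0 then [0] else [-1, 0, 1] := by
  simp only [charge_set_alt]
  rw [upLoop_id n [] (by omega), downLoop_id n [] h1]
  simp

theorem AB_eq (n : Int) : charge_set n = charge_set_alt n := by
  have main : ∀ (k : Nat) (n : Int), n.natAbs = k → charge_set n = charge_set_alt n := by
    intro k
    induction k using Nat.strong_induction_on with
    | _ k ih =>
      intro n hk
      by_cases hs : -1 ≤ n ∧ n ≤ 1
      · rw [B_base n hs.1 hs.2]
        have : n = -1 ∨ n = 0 ∨ n = 1 := by omega
        rcases this with rfl | rfl | rfl <;> decide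
      · by_cases hp : 2 ≤ n
        · rw [A_pos n hp, B_pos n hp, ih (n - 2).natAbs (by omega) _ rfl]
        · have hn : n ≤ -2 := by omega
          rw [A_neg n hn, B_neg n hn, ih (n + 2).natAbs (by omega) _ rfl]
  exact main n.natAbs n rfl

-- ===== VERDICT (by name: the statement is the Claim_ definition above) =====
theorem charge_set_spec : Claim_equal_charge_set := by
  intro n _
  unfold Spec_charge_set
  exact AB_eq n
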